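-- pv_equiv track=rewrite | github.com/hgaburton/quantel | quantel/opt/csf_disco.py | _is_valid_coupling
-- ===== SOURCE A (Python) =====
-- def _is_valid_coupling(sc):
--     """Return True iff *sc* satisfies the genealogical ballot condition."""
--     cumsum = 0
--     for c in sc:
--         if c == '+':
--             cumsum += 1
--         else:
--             cumsum -= 1
--             if cumsum < 0:
--                 return False
--     return True
-- ===== SOURCE B (Python) =====
-- def _is_valid_coupling(sc):
--     """Return True iff *sc* satisfies the genealogical ballot condition."""
--     total = 0
--     prefixes = [total := total + (1 if c == '+' else -1) for c in sc]
--     return not prefixes or min(prefixes) >= 0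
-- ===== Notes on version B (the rewrite author's own statement) =====
-- stated objective: idiomatic
-- what changed: A fuses accumulation and early-exit in one loop; B first materialises the full prefix-sum sequence of +1/-1 steps and then checks nonnegativity via a single min() comparison (with an empty-input guard).
import Mathlib
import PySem

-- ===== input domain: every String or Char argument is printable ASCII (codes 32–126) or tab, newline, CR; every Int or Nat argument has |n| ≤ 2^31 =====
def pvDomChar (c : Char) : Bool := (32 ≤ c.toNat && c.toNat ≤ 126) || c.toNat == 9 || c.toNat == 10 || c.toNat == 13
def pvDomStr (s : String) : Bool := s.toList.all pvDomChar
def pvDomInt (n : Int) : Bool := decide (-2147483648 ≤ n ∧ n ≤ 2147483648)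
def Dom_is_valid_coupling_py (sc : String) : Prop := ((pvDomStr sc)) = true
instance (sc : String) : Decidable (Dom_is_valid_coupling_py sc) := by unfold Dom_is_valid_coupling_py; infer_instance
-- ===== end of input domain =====

-- B replaces A's fused accumulate-and-early-exit loop by materialising the prefix-sum
-- sequence and testing min(prefixes) >= 0 once (idiomatic decomposition; same cost).


-- ===== PORT A =====
-- the for-loop over sc with accumulator cumsum and early 'return False'
def pvALoop : List Char → Int → Bool
  | [], _ => true
  | c :: rest, cumsum =>
    if c == '+' then pvALoop rest (cumsum + 1)
    else if cumsum - 1 < 0 then false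
    else pvALoop rest (cumsum - 1)

def is_valid_coupling_py (sc : String) : Bool := pvALoop sc.toList 0

-- ===== PORT B =====
def is_valid_coupling_py_alt (sc : String) : Bool :=
  -- prefixes = running sums of the +1/-1 steps (the accumulating comprehension)
  let prefixes := ((sc.toList.map (fun c => if c == '+' then (1 : Int) else -1)).scanl (· + ·) 0).tail
  -- not prefixes or min(prefixes) >= 0
  prefixes.isEmpty ||
    (match PySem.List.min? prefixes (fun x => x) with
     | none => true
     | some m => decide (0 ≤ m))

-- ===== PRECONDITION & SPEC =====
def Spec_is_valid_coupling_py (sc : String) (out : Bool) : Prop := out = is_valid_coupling_py_alt sc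
instance (sc : String) (out : Bool) : Decidable (Spec_is_valid_coupling_py sc out) := by unfold Spec_is_valid_coupling_py; infer_instance

-- ===== CLAIM (what is proved, stated in full; the proofs are below) =====
def Claim_equal_is_valid_coupling_py : Prop := ∀ (sc : String), Dom_is_valid_coupling_py sc → Spec_is_valid_coupling_py sc (is_valid_coupling_py sc)

-- ===== LEMMAS AND PROOFS =====

-- scanl always begins with its seed
theorem scanl_add_eq_cons (b : Int) (m : List Int) :
    List.scanl (· + ·) b m = b :: (List.scanl (· + ·) b m).tail := by
  cases m <;> simp

-- A's loop from a nonnegative accumulator = all later prefix sums are nonnegative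
theorem pvALoop_eq_all (l : List Char) : ∀ (k : Int), 0 ≤ k →
    pvALoop l k
      = (((l.map (fun c => if c == '+' then (1 : Int) else -1)).scanl (· + ·) k).tail).all
          (fun x => decide (0 ≤ x)) := by
  induction l with
  | nil => intro k hk; simp [pvALoop]
  | cons c rest ih =>
    intro k hk
    rw [List.map_cons, List.scanl_cons, List.tail_cons, scanl_add_eq_cons, List.all_cons]
    by_cases hc : c == '+'
    · rw [show pvALoop (c :: rest) k = pvALoop rest (k + 1) by simp [pvALoop, hc],
        ih (k + 1) (by omega)]
      simp [hc, show (0:Int) ≤ k + 1 by omega]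
    · by_cases hneg : k - 1 < 0
      · rw [show pvALoop (c :: rest) k = false by simp [pvALoop, hc, hneg]]
        simp only [hc]
        simp [show ¬ (0:Int) ≤ k + -1 by omega]
      · rw [show pvALoop (c :: rest) k = pvALoop rest (k - 1) by simp [pvALoop, hc, hneg],
          ih (k - 1) (by omega)]
        simp only [hc]
        simp [show (0:Int) ≤ k + -1 by omega, show k - 1 = k + -1 by omega]

-- all-nonnegative = empty-or-min-nonnegative
theorem all_eq_min_check (l : List Int) :
    l.all (fun x => decide (0 ≤ x))
      = (l.isEmpty ||
          (match PySem.List.min? l (fun x => x) with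
           | none => true
           | some m => decide (0 ≤ m))) := by
  cases l with
  | nil => simp
  | cons a t =>
    rcases h : PySem.List.min? (a :: t) (fun x => x) with _ | m
    · exact absurd ((PySem.List.min?_eq_none_iff _ _).mp h) (by simp)
    · have hmem := PySem.List.min?_mem h
      have hmin := PySem.List.min?_isMin h
      simp only [List.isEmpty_cons, Bool.false_or]
      by_cases hm : (0:Int) ≤ m
      · have hall : (a :: t).all (fun x => decide ((0:Int) ≤ x)) = true := by
          simp only [List.all_eq_true, decide_eq_true_iff]
          exact fun x hx => le_trans hm (hmin x hx)
        rw [hall, decide_eq_true hm]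
      · have hfail : (a :: t).all (fun x => decide ((0:Int) ≤ x)) = false := by
          simp only [List.all_eq_false]
          exact ⟨m, hmem, by simpa using hm⟩
        rw [hfail]
        simp [hm]

-- ===== VERDICT (by name: the statement is the Claim_ definition above) =====
theorem is_valid_coupling_py_spec : Claim_equal_is_valid_coupling_py := by
  intro sc _
  unfold Spec_is_valid_coupling_py is_valid_coupling_py is_valid_coupling_py_alt
  rw [pvALoop_eq_all sc.toList 0 le_rfl, all_eq_min_check]
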